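-- pv_equiv track=rewrite | github.com/Eduardofmiranda/Python_estudos | Udemy_Python/.py | calculate_earnings
-- ===== SOURCE A (Python) =====
-- from collections import Counter
--
-- def calculate_earnings(shoe_sizes, customer_data):
--     size_count = Counter(shoe_sizes)
--     total_earnings = 0
--
--     for size, price in customer_data:
--         if size_count[size] > 0:
--             total_earnings += price
--             size_count[size] -= 1
--
--     return total_earnings
-- ===== SOURCE B (Python) =====
-- def calculate_earnings(shoe_sizes, customer_data):
--     total = 0
--     for size in set(shoe_sizes):
--         available = shoe_sizes.count(size)
--         prices = [price for s, price in customer_data if s == size]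
--         total += sum(prices[:available])
--     return total
-- ===== Notes on version B (the rewrite author's own statement) =====
-- stated objective: alternative
-- what changed: Replaces A's single streaming pass with a live Counter decrement by a per-size decomposition: for each distinct size, sum the first count(size) prices of the customers requesting it, in arrival order.
import Mathlib
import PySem

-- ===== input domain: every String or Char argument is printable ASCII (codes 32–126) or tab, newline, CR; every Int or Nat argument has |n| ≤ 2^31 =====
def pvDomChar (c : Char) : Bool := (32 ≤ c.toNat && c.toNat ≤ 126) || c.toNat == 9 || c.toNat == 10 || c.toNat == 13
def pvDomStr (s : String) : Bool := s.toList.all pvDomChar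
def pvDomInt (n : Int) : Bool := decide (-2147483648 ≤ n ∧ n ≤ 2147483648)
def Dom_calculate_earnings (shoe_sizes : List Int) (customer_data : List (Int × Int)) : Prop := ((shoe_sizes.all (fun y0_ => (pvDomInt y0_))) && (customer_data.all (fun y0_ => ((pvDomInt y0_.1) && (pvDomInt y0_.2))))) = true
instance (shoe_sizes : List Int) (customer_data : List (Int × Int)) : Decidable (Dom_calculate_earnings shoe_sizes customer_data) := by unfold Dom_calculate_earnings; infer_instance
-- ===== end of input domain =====

-- B replaces A's streaming pass with a per-size decomposition (sum of first count(size) prices per size); same results, alternative structure, no speed claim.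

-- ===== PORT A =====
def calculate_earnings (shoe_sizes : List Int) (customer_data : List (Int × Int)) : Int :=
  let size_count := PySem.Dict.counter shoe_sizes
  (customer_data.foldl
    (fun st c =>
      if st.1.getD c.1 0 > 0 then (st.1.insert c.1 (st.1.getD c.1 0 - 1), st.2 + c.2)
      else st)
    (size_count, (0 : Int))).2

-- ===== PORT B =====
def calculate_earnings_alt (shoe_sizes : List Int) (customer_data : List (Int × Int)) : Int :=
  (PySem.Set.ofList shoe_sizes).foldl
    (fun total size =>
      total +
        (((customer_data.filter (fun c => c.1 == size)).map (fun c => c.2)).take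
          (shoe_sizes.count size)).sum)
    0

-- ===== PRECONDITION & SPEC =====
def Spec_calculate_earnings (shoe_sizes : List Int) (customer_data : List (Int × Int)) (out : Int) : Prop := out = calculate_earnings_alt shoe_sizes customer_data
instance (shoe_sizes : List Int) (customer_data : List (Int × Int)) (out : Int) : Decidable (Spec_calculate_earnings shoe_sizes customer_data out) := by unfold Spec_calculate_earnings; infer_instance

-- ===== CLAIM (what is proved, stated in full; the proofs are below) =====
def Claim_equal_calculate_earnings : Prop := ∀ (shoe_sizes : List Int) (customer_data : List (Int × Int)), Dom_calculate_earnings shoe_sizes customer_data → Spec_calculate_earnings shoe_sizes customer_data (calculate_earnings shoe_sizes customer_data)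

-- ===== LEMMAS AND PROOFS =====

-- reference streaming computation over a capacity function
def pvStream (c : Int → Int) : List (Int × Int) → Int
  | [] => 0
  | (s, p) :: rest =>
      if c s > 0 then p + pvStream (Function.update c s (c s - 1)) rest
      else pvStream c rest

-- A's loop, with the counter dict abstracted to its lookup function
lemma pvLoopA (data : List (Int × Int)) :
    ∀ (d : PySem.Dict Int Int) (t : Int),
    (data.foldl
      (fun st c =>
        if st.1.getD c.1 0 > 0 then (st.1.insert c.1 (st.1.getD c.1 0 - 1), st.2 + c.2)
        else st)
      (d, t)).2 = t + pvStream (fun s => d.getD s 0) data := by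
  induction data with
  | nil => intro d t; simp [pvStream]
  | cons hd rest ih =>
    intro d t
    obtain ⟨s, p⟩ := hd
    by_cases h : d.getD s 0 > 0
    · simp only [List.foldl_cons, pvStream, h, if_true]
      rw [ih]
      have hf : (fun s' => (d.insert s (d.getD s 0 - 1)).getD s' 0)
          = Function.update (fun s' => d.getD s' 0) s (d.getD s 0 - 1) := by
        funext s'
        rw [PySem.Dict.getD_insert, Function.update_apply]
      rw [hf]
      ring
    · simp only [List.foldl_cons, pvStream, h, if_false]
      exact ih d t

-- pluck one summand out of a sum over a nodup key list
lemma pvSum_pluck (s p : Int) (f g : Int → Int) :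
    ∀ (K : List Int), K.Nodup → s ∈ K →
    (∀ s' ∈ K, f s' = if s' = s then p + g s' else g s') →
    (K.map f).sum = p + (K.map g).sum := by
  intro K
  induction K with
  | nil => intro _ hs; simp at hs
  | cons a K' ih =>
    intro hnd hs hfg
    rcases List.nodup_cons.mp hnd with ⟨ha, hnd'⟩
    simp only [List.map_cons, List.sum_cons]
    by_cases heq : s = a
    · subst heq
      have h1 : f s = p + g s := by simpa using hfg s (by simp)
      have h2 : (K'.map f) = (K'.map g) := by
        apply List.map_congr_left
        intro x hx
        rw [hfg x (by simp [hx]), if_neg (by rintro rfl; exact ha hx)]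
      rw [h1, h2]; ring
    · have hsK' : s ∈ K' := by
        cases List.mem_cons.mp hs with
        | inl h => exact absurd h heq
        | inr h => exact h
      have h1 : f a = g a := by
        have := hfg a (by simp)
        rwa [if_neg (fun h => heq h.symm)] at this
      rw [h1, ih hnd' hsK' (fun x hx => hfg x (by simp [hx]))]
      ring

-- the grouped per-size sum equals the streaming computation
lemma pvGroup (K : List Int) (hK : K.Nodup) :
    ∀ (data : List (Int × Int)) (c : Int → Int), (∀ s, s ∉ K → c s ≤ 0) →
    (K.map (fun s =>
      (((data.filter (fun x => x.1 == s)).map (fun x => x.2)).take (c s).toNat).sum)).sum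
      = pvStream c data := by
  intro data
  induction data with
  | nil =>
    intro c _
    simp [pvStream]
  | cons hd rest ih =>
    intro c h0
    obtain ⟨s, p⟩ := hd
    by_cases hpos : c s > 0
    · have hsK : s ∈ K := by
        by_contra hsK
        exact absurd hpos (not_lt.mpr (h0 s hsK))
      rw [pvStream, if_pos hpos]
      set c' := Function.update c s (c s - 1) with hc'
      have h0' : ∀ s', s' ∉ K → c' s' ≤ 0 := by
        intro s' hs'
        have hne : s' ≠ s := fun h => hs' (h ▸ hsK)
        rw [hc', Function.update_apply, if_neg hne]
        exact h0 s' hs'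
      rw [← ih c' h0']
      apply pvSum_pluck s p _ _ K hK hsK
      intro s' _
      by_cases he : s' = s
      · subst he
        have ht : (c s').toNat = (c s' - 1).toNat + 1 := by omega
        have hf : List.filter (fun x => x.1 == s') ((s', p) :: rest)
            = (s', p) :: List.filter (fun x => x.1 == s') rest := by simp
        rw [if_pos rfl, hf, List.map_cons, ht, List.take_succ_cons, List.sum_cons, hc',
          Function.update_self]
      · have hf : List.filter (fun x => x.1 == s') ((s, p) :: rest)
            = List.filter (fun x => x.1 == s') rest := by simp [Ne.symm he]
        rw [if_neg he, hf, hc', Function.update_apply, if_neg he]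
    · rw [pvStream, if_neg hpos]
      rw [← ih c h0]
      congr 1
      apply List.map_congr_left
      intro s' _
      by_cases he : s' = s
      · subst he
        have ht : (c s').toNat = 0 := by omega
        simp [ht]
      · simp only [List.filter_cons]
        rw [if_neg (by simp [Ne.symm he])]

-- B's foldl-with-accumulator is the sum over the mapped list
lemma pvFoldl_add (f : Int → Int) :
    ∀ (K : List Int) (a : Int),
    K.foldl (fun t s => t + f s) a = a + (K.map f).sum := by
  intro K
  induction K with
  | nil => intro a; simp
  | cons x K' ih =>
    intro a
    simp only [List.foldl_cons, List.map_cons, List.sum_cons]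
    rw [ih]; ring

-- ===== VERDICT (by name: the statement is the Claim_ definition above) =====
theorem calculate_earnings_spec : Claim_equal_calculate_earnings := by
  intro shoe_sizes customer_data _
  unfold Spec_calculate_earnings calculate_earnings calculate_earnings_alt
  rw [pvLoopA, pvFoldl_add, zero_add]
  have hc : (fun s => (PySem.Dict.counter shoe_sizes).getD s 0)
      = fun s => (shoe_sizes.count s : Int) := by
    funext s; exact PySem.Dict.getD_counter shoe_sizes s
  rw [zero_add, hc]
  rw [← pvGroup (PySem.Set.ofList shoe_sizes) (PySem.Set.nodup_ofList shoe_sizes) customer_data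
      (fun s => (shoe_sizes.count s : Int))
      (by intro s hs
          have : s ∉ shoe_sizes := by
            intro h; exact hs ((PySem.Set.mem_ofList shoe_sizes s).mpr h)
          simp [List.count_eq_zero_of_not_mem this])]
  simp
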